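-- pv_equiv track=rewrite | github.com/Zachanardo/Intellicrack | intellicrack/ui/distributed_processing.py | _determine_license_type
-- ===== SOURCE A (Python) =====
-- from typing import Any
--
-- def _determine_license_type(validation_methods: list[dict[str, Any]], key_algorithms: list[str]) -> str:
--     """Determine the type of license protection.
--
--     Args:
--         validation_methods: List of detected validation methods
--         key_algorithms: List of identified key algorithms
--
--     Returns:
--         String describing the type of license protection
--
--     """
--     if any(m["type"] == "online" for m in validation_methods):
--         if any(m["type"] == "hardware" for m in validation_methods):
--             return "cloud_hardware_locked"
--         return "cloud_based"
--     if any(m["type"] == "hardware" for m in validation_methods):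
--         return "hardware_locked"
--     if any(m["type"] == "time" for m in validation_methods):
--         return "trial_based"
--     if key_algorithms:
--         return "key_based"
--     return "simple_check"
-- ===== SOURCE B (Python) =====
-- def _determine_license_type(validation_methods: list, key_algorithms: list) -> str:
--     # One pass: fold the detected method types into a 3-bit mask
--     # (online=4, hardware=2, time=1), then index a fixed priority table.
--     BIT = {"online": 4, "hardware": 2, "time": 1}
--     mask = 0
--     for m in validation_methods:
--         mask |= BIT.get(m["type"], 0)
--     if mask:
--         return ["", "trial_based", "hardware_locked", "hardware_locked",
--                 "cloud_based", "cloud_based",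
--                 "cloud_hardware_locked", "cloud_hardware_locked"][mask]
--     return "key_based" if key_algorithms else "simple_check"
-- ===== Notes on version B (the rewrite author's own statement) =====
-- stated objective: alternative
-- what changed: Replaces A's four independent any-scans and branch cascade by a single fold building a 3-bit mask of detected method types (online=4, hardware=2, time=1) followed by one indexed lookup into a fixed priority table.
import Mathlib
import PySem

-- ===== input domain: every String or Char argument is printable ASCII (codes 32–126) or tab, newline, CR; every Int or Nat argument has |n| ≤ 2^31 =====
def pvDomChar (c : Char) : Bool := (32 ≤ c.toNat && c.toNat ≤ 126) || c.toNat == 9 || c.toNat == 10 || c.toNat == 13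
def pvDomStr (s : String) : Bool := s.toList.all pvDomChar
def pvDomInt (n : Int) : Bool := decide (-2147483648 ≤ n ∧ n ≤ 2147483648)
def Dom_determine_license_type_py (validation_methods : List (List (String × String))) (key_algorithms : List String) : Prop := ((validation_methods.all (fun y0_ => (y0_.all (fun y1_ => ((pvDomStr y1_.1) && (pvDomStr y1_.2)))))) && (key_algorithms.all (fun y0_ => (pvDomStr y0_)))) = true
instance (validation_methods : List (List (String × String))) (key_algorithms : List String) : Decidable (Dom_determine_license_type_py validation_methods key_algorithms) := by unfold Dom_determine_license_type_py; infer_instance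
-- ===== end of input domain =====

-- B replaces A's four any-scan branch cascade by one fold building a 3-bit mask of the
-- detected method types plus a single indexed lookup into a fixed priority table (objective: alternative).


-- ===== PORT A =====
-- m["type"]: first-match lookup in the association list; total form is exact under
-- Pre_ (every method dict carries a "type" key, so the lookup never misses).
def pvTypeOf (m : List (String × String)) : String :=
  (((m.find? (fun p => p.1 == "type")).map (·.2)).getD "")

def determine_license_type_py (validation_methods : List (List (String × String))) (key_algorithms : List String) : String :=
  if validation_methods.any (fun m => pvTypeOf m == "online") then
    if validation_methods.any (fun m => pvTypeOf m == "hardware") then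
      "cloud_hardware_locked"
    else
      "cloud_based"
  else if validation_methods.any (fun m => pvTypeOf m == "hardware") then
    "hardware_locked"
  else if validation_methods.any (fun m => pvTypeOf m == "time") then
    "trial_based"
  else if key_algorithms ≠ [] then
    "key_based"
  else
    "simple_check"

-- ===== PORT B =====
-- BIT.get(m["type"], 0) from Source B
def pvBitOf (t : String) : Nat :=
  if t == "online" then 4 else if t == "hardware" then 2 else if t == "time" then 1 else 0

def pvTable : List String :=
  ["", "trial_based", "hardware_locked", "hardware_locked", "cloud_based", "cloud_based",
   "cloud_hardware_locked", "cloud_hardware_locked"]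

def determine_license_type_py_alt (validation_methods : List (List (String × String))) (key_algorithms : List String) : String :=
  let mask := validation_methods.foldl (fun acc m => acc ||| pvBitOf (pvTypeOf m)) 0
  if mask ≠ 0 then
    -- TABLE[mask]: mask only ever has bits 4|2|1, so 1 ≤ mask ≤ 7 is always in range;
    -- getD is exact for Python's in-range list indexing.
    pvTable.getD mask ""
  else if key_algorithms ≠ [] then
    "key_based"
  else
    "simple_check"

-- ===== PRECONDITION & SPEC =====
-- Pre_ excludes inputs where some method dict lacks a "type" key: there B's full fold raises
-- KeyError, while A either raises KeyError too or returns a value only because its any-scans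
-- short-circuit before reaching the keyless dict (an accident of scan order).
def Pre_determine_license_type_py (validation_methods : List (List (String × String))) (key_algorithms : List String) : Prop :=
  ∀ m ∈ validation_methods, (m.find? (fun p => p.1 == "type")).isSome = true
instance (validation_methods : List (List (String × String))) (key_algorithms : List String) : Decidable (Pre_determine_license_type_py validation_methods key_algorithms) := by unfold Pre_determine_license_type_py; infer_instance

def pvWitness_determine_license_type_py : (List (List (String × String))) × List String :=
  ([[("type", "hardware")], [("type", "time")]], ["rsa"])

def Spec_determine_license_type_py (validation_methods : List (List (String × String))) (key_algorithms : List String) (out : String) : Prop := out = determine_license_type_py_alt validation_methods key_algorithms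
instance (validation_methods : List (List (String × String))) (key_algorithms : List String) (out : String) : Decidable (Spec_determine_license_type_py validation_methods key_algorithms out) := by unfold Spec_determine_license_type_py; infer_instance

-- ===== CLAIM (what is proved, stated in full; the proofs are below) =====
def Claim_equal_determine_license_type_py : Prop := ∀ (validation_methods : List (List (String × String))) (key_algorithms : List String), Dom_determine_license_type_py validation_methods key_algorithms → Pre_determine_license_type_py validation_methods key_algorithms → Spec_determine_license_type_py validation_methods key_algorithms (determine_license_type_py validation_methods key_algorithms)

-- ===== LEMMAS AND PROOFS =====
theorem foldl_or_acc (vm : List (List (String × String))) (acc : Nat) :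
    vm.foldl (fun a m => a ||| pvBitOf (pvTypeOf m)) acc
      = acc ||| vm.foldl (fun a m => a ||| pvBitOf (pvTypeOf m)) 0 := by
  induction vm generalizing acc with
  | nil => simp
  | cons m vm ih =>
    simp only [List.foldl_cons]
    rw [ih (acc ||| pvBitOf (pvTypeOf m)), ih (0 ||| pvBitOf (pvTypeOf m))]
    simp [Nat.or_assoc]

theorem mask_eq (vm : List (List (String × String))) :
    vm.foldl (fun a m => a ||| pvBitOf (pvTypeOf m)) 0
      = (if vm.any (fun m => pvTypeOf m == "online") then 4 else 0)
        ||| (if vm.any (fun m => pvTypeOf m == "hardware") then 2 else 0)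
        ||| (if vm.any (fun m => pvTypeOf m == "time") then 1 else 0) := by
  induction vm with
  | nil => simp
  | cons m vm ih =>
    simp only [List.foldl_cons, List.any_cons, Nat.zero_or]
    rw [foldl_or_acc, ih]
    by_cases h1 : pvTypeOf m == "online" <;>
    by_cases h2 : pvTypeOf m == "hardware" <;>
    by_cases h3 : pvTypeOf m == "time" <;>
    simp_all [pvBitOf] <;>
    by_cases a1 : ∃ x ∈ vm, pvTypeOf x = "online" <;>
    by_cases a2 : ∃ x ∈ vm, pvTypeOf x = "hardware" <;>
    by_cases a3 : ∃ x ∈ vm, pvTypeOf x = "time" <;>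
    simp [a1, a2, a3]

-- ===== VERDICT (by name: the statement is the Claim_ definition above) =====
theorem determine_license_type_py_spec : Claim_equal_determine_license_type_py := by
  intro vm ka _ _
  unfold Spec_determine_license_type_py determine_license_type_py determine_license_type_py_alt
  rw [mask_eq]
  by_cases a1 : vm.any (fun m => pvTypeOf m == "online") <;>
  by_cases a2 : vm.any (fun m => pvTypeOf m == "hardware") <;>
  by_cases a3 : vm.any (fun m => pvTypeOf m == "time") <;>
  simp [a1, a2, a3, pvTable]
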